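-- pv_equiv track=rewrite | github.com/PasserJW767/Algorithm | Chapter1/2-Easy/CM78.py | chkSubStr
-- ===== SOURCE A (Python) =====
-- def chkSubStr(p, n, s):
--     # write code here
--     result = []
--     for x in p:
--         if x in s:
--             result.append(True)
--         else:
--             result.append(False)
--     return result
-- ===== SOURCE B (Python) =====
-- def chkSubStr(p, n, s):
--     # explicit positional scan: compare each window of s against x, instead of the `in` operator
--     return [any(s[i:i + len(x)] == x for i in range(len(s) - len(x) + 1)) for x in p]
-- ===== Notes on version B (the rewrite author's own statement) =====
-- stated objective: alternative
-- what changed: replaces the append-loop using Python's `in` operator by a list comprehension that checks each pattern with an explicit window scan (s[i:i+len(x)] == x over all start positions)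
import Mathlib
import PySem

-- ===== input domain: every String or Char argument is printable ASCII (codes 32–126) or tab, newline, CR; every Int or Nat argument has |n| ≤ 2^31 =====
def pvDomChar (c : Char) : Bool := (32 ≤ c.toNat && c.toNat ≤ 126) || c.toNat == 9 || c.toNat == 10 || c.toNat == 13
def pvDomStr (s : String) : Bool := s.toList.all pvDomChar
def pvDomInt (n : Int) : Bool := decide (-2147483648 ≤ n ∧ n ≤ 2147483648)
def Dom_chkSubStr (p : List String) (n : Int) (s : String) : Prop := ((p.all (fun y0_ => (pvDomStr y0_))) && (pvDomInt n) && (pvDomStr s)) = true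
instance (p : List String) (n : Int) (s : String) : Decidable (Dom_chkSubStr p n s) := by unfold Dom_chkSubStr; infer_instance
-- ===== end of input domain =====

-- B changes A's append-loop over Python's `in` operator into a comprehension doing an explicit window scan per pattern (alternative decomposition, same cost).

-- ===== PORT A =====
-- literal port of A: accumulate result, appending True/False per pattern via `x in s`
def chkSubStr (p : List String) (n : Int) (s : String) : List Bool :=
  p.foldl (fun result x =>
    if PySem.Str.isIn x s then result ++ [true] else result ++ [false]) []

-- ===== PORT B =====
-- literal port of B: [any(s[i:i+len(x)] == x for i in range(len(s)-len(x)+1)) for x in p]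
def chkSubStr_alt (p : List String) (n : Int) (s : String) : List Bool :=
  p.map (fun x =>
    (PySem.List.pyRange 0 (PySem.Str.len s - PySem.Str.len x + 1) 1).any
      (fun i => PySem.Str.slice s (some i) (some (i + PySem.Str.len x)) == x))

-- ===== PRECONDITION & SPEC =====
def Spec_chkSubStr (p : List String) (n : Int) (s : String) (out : List Bool) : Prop := out = chkSubStr_alt p n s
instance (p : List String) (n : Int) (s : String) (out : List Bool) : Decidable (Spec_chkSubStr p n s out) := by unfold Spec_chkSubStr; infer_instance

-- ===== CLAIM (what is proved, stated in full; the proofs are below) =====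
def Claim_equal_chkSubStr : Prop := ∀ (p : List String) (n : Int) (s : String), Dom_chkSubStr p n s → Spec_chkSubStr p n s (chkSubStr p n s)

-- ===== LEMMAS AND PROOFS =====

-- the window scan of B computes exactly `x in s`
theorem pv_scan_eq_isIn (x s : String) :
    ((PySem.List.pyRange 0 (PySem.Str.len s - PySem.Str.len x + 1) 1).any
      (fun i => PySem.Str.slice s (some i) (some (i + PySem.Str.len x)) == x))
    = PySem.Str.isIn x s := by
  rw [Bool.eq_iff_iff, List.any_eq_true]
  simp only [PySem.Str.len_eq, PySem.List.mem_pyRange_one]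
  rw [PySem.Str.isIn_eq, ← PySem.Chars.exists_prefix_drop_iff_isIn]
  constructor
  · rintro ⟨i, ⟨hi0, hi1⟩, hp⟩
    refine ⟨i.toNat, ?_⟩
    rw [beq_iff_eq] at hp
    have hsl : (PySem.Str.slice s (some i) (some (i + (x.toList.length : Int)))).toList
        = PySem.Chars.slice s.toList (some i) (some (i + (x.toList.length : Int))) := by
      simp [PySem.Str.slice]
    have := congrArg String.toList hp
    rw [hsl] at this
    unfold PySem.Chars.slice at this
    rw [PySem.List.slice_toNat] at this
    have hlen : (i + (x.toList.length : Int)).toNat - i.toNat = x.toList.length := by omega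
    rw [hlen] at this
    rw [List.prefix_iff_eq_take]
    exact this.symm
    all_goals omega
  · rintro ⟨j, hj⟩
    have hj' : x.toList <+: s.toList.drop (min j s.toList.length) := by
      by_cases h : j ≤ s.toList.length
      · rw [Nat.min_eq_left h]; exact hj
      · have : s.toList.drop j = [] := List.drop_eq_nil_of_le (by omega)
        rw [this] at hj
        have hx : x.toList = [] := List.prefix_nil.mp hj
        simp [hx]
    set k := min j s.toList.length with hk
    have hlenle : x.toList.length ≤ s.toList.length - k := by
      have := hj'.length_le
      simp only [List.length_drop] at this
      omega
    have hkle : k ≤ s.toList.length := by omega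
    refine ⟨(k : Int), ⟨by positivity, by omega⟩, ?_⟩
    rw [beq_iff_eq]
    have htake : x.toList = (s.toList.drop k).take x.toList.length :=
      List.prefix_iff_eq_take.mp hj'
    apply String.toList_inj.mp
    have hsl : (PySem.Str.slice s (some (k : Int)) (some ((k : Int) + (x.toList.length : Int)))).toList
        = PySem.Chars.slice s.toList (some (k : Int)) (some ((k : Int) + (x.toList.length : Int))) := by
      simp [PySem.Str.slice]
    rw [hsl]
    unfold PySem.Chars.slice
    rw [PySem.List.slice_toNat]
    have hlen : ((k : Int) + (x.toList.length : Int)).toNat - (k : Int).toNat = x.toList.length := by omega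
    rw [hlen]
    simpa using htake.symm
    all_goals omega

-- ===== VERDICT (by name: the statement is the Claim_ definition above) =====
theorem chkSubStr_spec : Claim_equal_chkSubStr := by
  intro p n s hd
  clear hd
  unfold Spec_chkSubStr chkSubStr chkSubStr_alt
  induction p using List.reverseRecOn with
  | nil => rfl
  | append_singleton xs x ih =>
      rw [List.foldl_append, List.foldl_cons, List.foldl_nil, List.map_append,
        List.map_cons, List.map_nil, ih, pv_scan_eq_isIn]
      split <;> rename_i h <;> simp at h <;> simp [h]
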